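-- pv_equiv track=rewrite | github.com/RowenFelt/Burrows-Wheeler-Alignment | sparse_bwt_query.py | build_sparse_count_matrix
-- ===== SOURCE A (Python) =====
-- def build_sparse_count_matrix(letters, last_column, sparsity):
--     """ Build count matrix from last_column
--
--     Args:
--         letters: String of letters in index
--         last_column: Last column as string
--         sparsity: factor by which to reduce count_matrix
--
--     Return:
--         Dictionary of count array indexed by symbol with sparsity
--     """
--     count_matrix = {}
--     count_letters = {}
--     for letter in letters:
--         count_matrix[letter] = []
--         count_letters[letter] = 0
--     i = 0
--     for current_letter in last_column:
--         if i % sparsity == 0: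
--             for letter in letters:
--                 count_matrix[letter].append(count_letters[letter])
--         i+=1
--         count_letters[current_letter] = count_letters[current_letter] + 1 #sum of letters
--     return count_matrix
-- ===== SOURCE B (Python) =====
-- def build_sparse_count_matrix(letters, last_column, sparsity):
--     """Two-phase re-implementation: the scan over last_column only snapshots the
--     counter dict at sampled positions (no per-letter appending there); a second
--     pass transposes the snapshot list into the per-letter count rows."""
--     counts = {l: 0 for l in letters}
--     snapshots = []
--     i = 0
--     for ch in last_column:
--         if i % sparsity == 0:
--             snapshots.append(counts.copy())
--         counts[ch] += 1
--         i += 1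
--     count_matrix = {l: [] for l in letters}
--     for snap in snapshots:
--         for l in letters:
--             count_matrix[l].append(snap[l])
--     return count_matrix
-- ===== Notes on version B (the rewrite author's own statement) =====
-- stated objective: alternative
-- what changed: B splits A's single interleaved pass in two phases: the scan over last_column keeps only the counter dict and snapshots it whole at sampled positions (no live appending into per-letter lists), and a second pass transposes the snapshot list into the per-letter rows.
import Mathlib
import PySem

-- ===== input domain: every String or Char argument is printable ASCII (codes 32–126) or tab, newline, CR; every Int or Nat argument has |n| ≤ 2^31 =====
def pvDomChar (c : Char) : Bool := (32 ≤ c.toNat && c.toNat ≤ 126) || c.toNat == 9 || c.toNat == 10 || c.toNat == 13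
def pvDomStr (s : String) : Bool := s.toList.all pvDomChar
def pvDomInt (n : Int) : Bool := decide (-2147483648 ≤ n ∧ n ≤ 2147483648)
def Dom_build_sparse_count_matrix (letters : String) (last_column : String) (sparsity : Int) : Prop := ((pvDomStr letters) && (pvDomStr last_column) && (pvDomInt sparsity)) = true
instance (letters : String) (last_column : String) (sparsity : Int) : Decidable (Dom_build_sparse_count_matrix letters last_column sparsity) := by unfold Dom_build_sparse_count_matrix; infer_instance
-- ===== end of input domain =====

-- B splits A's interleaved pass in two phases (snapshot the counter dict at sampled
-- positions, then transpose the snapshots); equivalence is about the RETURN value,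
-- neither program mutates its arguments.

-- ===== PORT A =====
-- Python A: two dicts keyed by the letters; one position-major pass over last_column,
-- appending every letter's live counter into its row whenever i % sparsity == 0.
def build_sparse_count_matrix (letters : String) (last_column : String) (sparsity : Int) : List (String × List Int) :=
  -- init loop: count_matrix[letter] = []; count_letters[letter] = 0
  let init := letters.toList.foldl
      (fun (p : PySem.Dict String (List Int) × PySem.Dict String Int) letter =>
        (p.1.insert letter.toString [], p.2.insert letter.toString 0))
      (PySem.Dict.empty, PySem.Dict.empty)
  -- main loop over last_column with state (i, count_matrix, count_letters)
  let fin := last_column.toList.foldl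
      (fun (st : Int × PySem.Dict String (List Int) × PySem.Dict String Int) current_letter =>
        let i := st.1
        let cm := st.2.1
        let cl := st.2.2
        let cm := if PySem.Int.mod i sparsity == 0 then
            letters.toList.foldl
              (fun cm letter => cm.modify letter.toString [] (fun xs => xs ++ [cl.getD letter.toString 0])) cm
          else cm
        -- count_letters[current_letter] = count_letters[current_letter] + 1
        -- (KeyError when current_letter ∉ letters is excluded by Pre_; modify is exact inside Pre_)
        (i + 1, cm, cl.modify current_letter.toString 0 (· + 1)))
      (0, init.1, init.2)
  fin.2.1.items

-- ===== PORT B =====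
def build_sparse_count_matrix_alt (letters : String) (last_column : String) (sparsity : Int) : List (String × List Int) :=
  -- phase 1: counts = {l: 0 for l in letters}; scan last_column snapshotting counts at sampled i
  let counts := letters.toList.foldl
      (fun (d : PySem.Dict String Int) l => d.insert l.toString 0) PySem.Dict.empty
  let fin := last_column.toList.foldl
      (fun (st : Int × PySem.Dict String Int × List (PySem.Dict String Int)) ch =>
        let i := st.1
        let counts := st.2.1
        let snapshots := st.2.2
        let snapshots := if PySem.Int.mod i sparsity == 0 then snapshots ++ [counts] else snapshots
        -- counts[ch] += 1 (KeyError when ch ∉ letters is excluded by Pre_; modify is exact inside Pre_)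
        (i + 1, counts.modify ch.toString 0 (· + 1), snapshots))
      (0, counts, [])
  -- phase 2: count_matrix = {l: [] for l in letters}; for snap in snapshots: for l in letters: count_matrix[l].append(snap[l])
  let cmInit := letters.toList.foldl
      (fun (d : PySem.Dict String (List Int)) l => d.insert l.toString []) PySem.Dict.empty
  (fin.2.2.foldl
      (fun cm snap =>
        letters.toList.foldl
          (fun cm letter => cm.modify letter.toString [] (fun xs => xs ++ [snap.getD letter.toString 0])) cm)
      cmInit).items

-- ===== PRECONDITION & SPEC =====
-- Pre_ is exactly the inputs on which Python A returns: it excludes sparsity = 0 (A raises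
-- ZeroDivisionError) and characters of last_column not in letters (A raises KeyError).
def Pre_build_sparse_count_matrix (letters : String) (last_column : String) (sparsity : Int) : Prop :=
  sparsity ≠ 0 ∧ last_column.toList.all (fun c => letters.toList.contains c) = true
instance (letters : String) (last_column : String) (sparsity : Int) : Decidable (Pre_build_sparse_count_matrix letters last_column sparsity) := by unfold Pre_build_sparse_count_matrix; infer_instance

def pvWitness_build_sparse_count_matrix : String × String × Int := ("ab", "abba", 2)

def Spec_build_sparse_count_matrix (letters : String) (last_column : String) (sparsity : Int) (out : List (String × List Int)) : Prop := out = build_sparse_count_matrix_alt letters last_column sparsity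
instance (letters : String) (last_column : String) (sparsity : Int) (out : List (String × List Int)) : Decidable (Spec_build_sparse_count_matrix letters last_column sparsity out) := by unfold Spec_build_sparse_count_matrix; infer_instance

-- ===== CLAIM (what is proved, stated in full; the proofs are below) =====
def Claim_equal_build_sparse_count_matrix : Prop := ∀ (letters : String) (last_column : String) (sparsity : Int), Dom_build_sparse_count_matrix letters last_column sparsity → Pre_build_sparse_count_matrix letters last_column sparsity → Spec_build_sparse_count_matrix letters last_column sparsity (build_sparse_count_matrix letters last_column sparsity)

-- ===== LEMMAS AND PROOFS =====

theorem pvCharToString_inj {c d : Char} (h : c.toString = d.toString) : c = d := by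
  have := congrArg String.toList h
  simpa [Char.toString] using this

-- the per-index sampling both programs perform, as a recursion (proof-side spec):
-- the letter's counter value at every sampled index, single occurrence each
def pvSamp (l : Char) (s : Int) : List Char → Int → Int → List Int
  | [], _, _ => []
  | ch :: t, i, c =>
    (if PySem.Int.mod i s == 0 then [c] else []) ++
      pvSamp l s t (i + 1) (if ch == l then c + 1 else c)

-- counter update of the scan, seen through getD at a letter
theorem pvCounts_modify_getD (cl : PySem.Dict String Int) (ch l : Char) :
    (cl.modify ch.toString 0 (· + 1)).getD l.toString 0
      = if ch == l then cl.getD l.toString 0 + 1 else cl.getD l.toString 0 := by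
  rw [PySem.Dict.getD_modify]
  by_cases h : ch = l
  · subst h; simp
  · have hne : l.toString ≠ ch.toString := fun he => h (pvCharToString_inj he).symm
    rw [if_neg hne]
    simp [h]

-- filtering the letter-keyed pairs at a key picks one copy per occurrence of the letter
theorem pvFilter_map_key (L : List Char) (v : Char → Int) (l : Char) :
    ((L.map (fun l' => (l'.toString, v l'))).filter (fun p => p.1 == l.toString)).map (·.2)
      = List.replicate (L.count l) (v l) := by
  induction L with
  | nil => simp
  | cons a L ih =>
    rw [List.map_cons, List.filter_cons, List.count_cons]
    by_cases h : a = l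
    · subst h
      rw [if_pos (by exact beq_self_eq_true _), List.map_cons, ih,
          if_pos (by exact beq_self_eq_true _), List.replicate_succ]
    · have hne : ¬ (a.toString == l.toString) = true := by
        intro hbe
        exact h (pvCharToString_inj (by simpa using hbe))
      have hbeq : (a == l) = false := by simpa using h
      rw [if_neg hne, ih, hbeq, if_neg (by simp)]
      simp

-- one append-loop over letters (A's snapshot, B's transpose step): getD at a letter
-- appends cl's counter once per occurrence of that letter
theorem pvSnapshot_getD (L : List Char)
    (cm : PySem.Dict String (List Int)) (cl : PySem.Dict String Int) (l : Char) :
    (L.foldl (fun cm letter => cm.modify letter.toString [] (fun xs => xs ++ [cl.getD letter.toString 0])) cm).getD l.toString []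
      = cm.getD l.toString [] ++ List.replicate (L.count l) (cl.getD l.toString 0) := by
  have h1 : L.foldl (fun cm letter => cm.modify letter.toString [] (fun xs => xs ++ [cl.getD letter.toString 0])) cm
      = (L.map (fun l' => (l'.toString, cl.getD l'.toString 0))).foldl
          (fun d p => d.modify p.1 [] (fun xs => xs ++ [p.2])) cm := by
    rw [List.foldl_map]
  rw [h1, PySem.Dict.getD_foldl_modify_append, pvFilter_map_key]

-- the same loop leaves the keys unchanged when every letter's key is present
theorem pvSnapshot_keys (L : List Char)
    (cm : PySem.Dict String (List Int)) (cl : PySem.Dict String Int)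
    (hk : ∀ l ∈ L, l.toString ∈ cm.keys) :
    (L.foldl (fun cm letter => cm.modify letter.toString [] (fun xs => xs ++ [cl.getD letter.toString 0])) cm).keys
      = cm.keys := by
  rw [PySem.Dict.keys_foldl_modify_key]
  rw [PySem.Set.update_eq_append_filter]
  simp
  exact fun a ha => hk a ha

-- B's scan: the snapshot list projected at a letter is that letter's sampled counter values
theorem pvB_loop_snaps (s : Int) (l : Char) :
    ∀ (t : List Char) (i : Int) (cl : PySem.Dict String Int) (snaps : List (PySem.Dict String Int)),
    ((t.foldl
      (fun (st : Int × PySem.Dict String Int × List (PySem.Dict String Int)) ch =>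
        let i := st.1
        let counts := st.2.1
        let snapshots := st.2.2
        let snapshots := if PySem.Int.mod i s == 0 then snapshots ++ [counts] else snapshots
        (i + 1, counts.modify ch.toString 0 (· + 1), snapshots))
      (i, cl, snaps)).2.2).map (fun snap => snap.getD l.toString 0)
      = snaps.map (fun snap => snap.getD l.toString 0) ++ pvSamp l s t i (cl.getD l.toString 0) := by
  intro t
  induction t with
  | nil => intro i cl snaps; simp [pvSamp]
  | cons ch t ih =>
    intro i cl snaps
    simp only [List.foldl_cons, pvSamp]
    rw [ih]
    by_cases h : PySem.Int.mod i s == 0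
    · rw [if_pos h, if_pos h, pvCounts_modify_getD]
      simp
    · rw [if_neg h, if_neg h, pvCounts_modify_getD]
      simp

-- B's transpose: replaying the snapshots appends, per letter, one copy per occurrence
theorem pvB_transpose_getD (L : List Char) (l : Char) :
    ∀ (snaps : List (PySem.Dict String Int)) (d : PySem.Dict String (List Int)),
    (snaps.foldl
      (fun cm snap =>
        L.foldl (fun cm letter => cm.modify letter.toString [] (fun xs => xs ++ [snap.getD letter.toString 0])) cm)
      d).getD l.toString []
      = d.getD l.toString []
        ++ (snaps.map (fun snap => snap.getD l.toString 0)).flatMap (fun c => List.replicate (L.count l) c) := by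
  intro snaps
  induction snaps with
  | nil => intro d; simp
  | cons snap snaps ih =>
    intro d
    simp only [List.foldl_cons, List.map_cons, List.flatMap_cons]
    rw [ih, pvSnapshot_getD]
    simp

-- the transpose loop leaves the keys unchanged when every letter's key is present
theorem pvB_transpose_keys (L : List Char) :
    ∀ (snaps : List (PySem.Dict String Int)) (d : PySem.Dict String (List Int))
      (_hk : ∀ l ∈ L, l.toString ∈ d.keys),
    (snaps.foldl
      (fun cm snap =>
        L.foldl (fun cm letter => cm.modify letter.toString [] (fun xs => xs ++ [snap.getD letter.toString 0])) cm)
      d).keys = d.keys := by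
  intro snaps
  induction snaps with
  | nil => intro d _; simp
  | cons snap snaps ih =>
    intro d hk
    simp only [List.foldl_cons]
    rw [ih _ (fun l hm => by rw [pvSnapshot_keys L d snap hk]; exact hk l hm),
        pvSnapshot_keys L d snap hk]

-- main invariant of A's loop, at getD level: each sampled counter value is appended once
-- per occurrence of the letter
theorem pvA_loop_getD (letters : List Char) (s : Int) (l : Char) :
    ∀ (t : List Char) (i : Int) (cm : PySem.Dict String (List Int)) (cl : PySem.Dict String Int),
    ((t.foldl
      (fun (st : Int × PySem.Dict String (List Int) × PySem.Dict String Int) current_letter =>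
        let i := st.1
        let cm := st.2.1
        let cl := st.2.2
        let cm := if PySem.Int.mod i s == 0 then
            letters.foldl
              (fun cm letter => cm.modify letter.toString [] (fun xs => xs ++ [cl.getD letter.toString 0])) cm
          else cm
        (i + 1, cm, cl.modify current_letter.toString 0 (· + 1)))
      (i, cm, cl)).2.1).getD l.toString []
      = cm.getD l.toString []
        ++ (pvSamp l s t i (cl.getD l.toString 0)).flatMap (fun c => List.replicate (letters.count l) c) := by
  intro t
  induction t with
  | nil => intro i cm cl; simp [pvSamp]
  | cons ch t ih =>
    intro i cm cl
    simp only [List.foldl_cons, pvSamp]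
    rw [ih]
    by_cases h : PySem.Int.mod i s == 0
    · rw [if_pos h, if_pos h, pvCounts_modify_getD, pvSnapshot_getD]
      simp
    · rw [if_neg h, if_neg h, pvCounts_modify_getD]
      simp

-- keys of A's count_matrix are preserved by the main loop
theorem pvA_loop_keys (letters : List Char) (s : Int) :
    ∀ (t : List Char) (i : Int) (cm : PySem.Dict String (List Int)) (cl : PySem.Dict String Int)
      (_hk : ∀ l ∈ letters, l.toString ∈ cm.keys),
    ((t.foldl
      (fun (st : Int × PySem.Dict String (List Int) × PySem.Dict String Int) current_letter =>
        let i := st.1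
        let cm := st.2.1
        let cl := st.2.2
        let cm := if PySem.Int.mod i s == 0 then
            letters.foldl
              (fun cm letter => cm.modify letter.toString [] (fun xs => xs ++ [cl.getD letter.toString 0])) cm
          else cm
        (i + 1, cm, cl.modify current_letter.toString 0 (· + 1)))
      (i, cm, cl)).2.1).keys = cm.keys := by
  intro t
  induction t with
  | nil => intro i cm cl _; simp
  | cons ch t ih =>
    intro i cm cl hk
    simp only [List.foldl_cons]
    by_cases h : PySem.Int.mod i s == 0
    · rw [if_pos h]
      rw [ih _ _ _ (fun l hm => by rw [pvSnapshot_keys letters cm cl hk]; exact hk l hm),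
          pvSnapshot_keys letters cm cl hk]
    · rw [if_neg h]
      exact ih _ _ _ hk

-- init dict loops (possibly duplicate letters): getD at a letter present in the list
theorem pvFold_insert_getD_notmem {ν : Type} (L : List Char) (v : Char → ν) (dflt : ν)
    (l : Char) (hl : l ∉ L) :
    ∀ (d : PySem.Dict String ν),
    (L.foldl (fun d l' => d.insert l'.toString (v l')) d).getD l.toString dflt = d.getD l.toString dflt := by
  induction L with
  | nil => intro d; simp
  | cons a L ih =>
    intro d
    simp only [List.foldl_cons]
    rw [ih (fun hm => hl (List.mem_cons_of_mem a hm))]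
    have hne : l.toString ≠ a.toString := fun he =>
      hl (by rw [pvCharToString_inj he]; exact List.mem_cons_self)
    exact PySem.Dict.getD_insert_of_ne d (v a) dflt hne

theorem pvFold_insert_getD {ν : Type} (L : List Char) (v : Char → ν) (dflt : ν)
    (l : Char) (hl : l ∈ L) :
    ∀ (d : PySem.Dict String ν),
    (L.foldl (fun d l' => d.insert l'.toString (v l')) d).getD l.toString dflt = v l := by
  induction L with
  | nil => cases hl
  | cons a L ih =>
    intro d
    simp only [List.foldl_cons]
    by_cases hm : l ∈ L
    · exact ih hm _
    · have : l = a := by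
        rcases List.mem_cons.mp hl with h | h
        · exact h
        · exact absurd h hm
      subst this
      rw [pvFold_insert_getD_notmem L v dflt l hm]
      exact PySem.Dict.getD_insert_self d l.toString (v l) dflt

-- keys of the init dicts: the distinct letters, as one-character strings, in first order
theorem pvDiscard_map (s : List Char) (x : Char) :
    PySem.Set.discard (s.map Char.toString) x.toString = (PySem.Set.discard s x).map Char.toString := by
  induction s with
  | nil => simp [PySem.Set.discard]
  | cons a s ih =>
    simp only [List.map_cons, PySem.Set.discard, List.filter_cons] at *
    by_cases h : a = x
    · subst h
      simpa using ih
    · have hne : ¬ (a.toString == x.toString) = true := by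
        intro hbe
        exact h (pvCharToString_inj (by simpa using hbe))
      have hbeq : ¬ (a == x) = true := by simpa using h
      simp only [hne, hbeq, Bool.not_false, if_true, List.map_cons]
      rw [ih]

theorem pvOfList_map (L : List Char) :
    PySem.Set.ofList (L.map Char.toString) = (PySem.Set.ofList L).map Char.toString := by
  induction L with
  | nil => simp
  | cons a L ih =>
    rw [List.map_cons, PySem.Set.ofList_cons, PySem.Set.ofList_cons, ih, List.map_cons,
        pvDiscard_map]

theorem pvMapToString_nodup {L : List Char} (hnd : L.Nodup) : (L.map Char.toString).Nodup :=
  hnd.map (fun _ _ h => pvCharToString_inj h)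

theorem pvInit_keys {ν : Type} (L : List Char) (v : Char → ν) :
    (L.foldl (fun (d : PySem.Dict String ν) l => d.insert l.toString (v l)) PySem.Dict.empty).keys
      = (PySem.Set.ofList L).map Char.toString := by
  rw [PySem.Dict.keys_foldl_insert_key, ← pvOfList_map]
  simp [PySem.Set.update_nil_left]

-- assemble items from keys + getD
theorem pvItems_of_keys_getD {ν : Type} [Inhabited ν] (d : PySem.Dict String ν)
    (L : List Char) (hnd : (L.map Char.toString).Nodup)
    (hk : d.keys = L.map Char.toString) (v : Char → ν) (dflt : ν)
    (hv : ∀ l ∈ L, d.getD l.toString dflt = v l) :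
    d.items = L.map (fun l => (l.toString, v l)) := by
  have hkeys : d.items.map (·.1) = L.map Char.toString := hk
  have hlen : d.items.length = L.length := by
    have := congrArg List.length hkeys
    simpa using this
  apply List.ext_getElem (by simpa using hlen)
  intro j hj hj'
  have hjL : j < L.length := by simpa using hj'
  have h1 : (d.items[j]).1 = (L[j]).toString := by
    have := congrArg (fun xs => xs[j]?) hkeys
    simp only [List.getElem?_map] at this
    have h2 := List.getElem?_eq_getElem hj
    have h3 := List.getElem?_eq_getElem hjL
    rw [h2, h3] at this
    simpa using this
  have : d.items[j] = ((L[j]).toString, (d.items[j]).2) := by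
    cases h : d.items[j] with
    | mk a b => simp only [h] at h1 ⊢; simp [h1]
  have hget : d.getD (L[j]).toString dflt = (d.items[j]).2 := by
    apply PySem.Dict.getD_of_mem_items
    · rw [← this]; exact List.getElem_mem hj
    · rw [hk]; exact hnd
  have hvj : d.getD (L[j]).toString dflt = v (L[j]) := hv _ (List.getElem_mem hjL)
  rw [this]
  simp only [List.getElem_map]
  rw [← hget, hvj]

-- ===== VERDICT (by name: the statement is the Claim_ definition above) =====
theorem build_sparse_count_matrix_spec : Claim_equal_build_sparse_count_matrix := by
  intro letters last_column sparsity _ _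
  unfold Spec_build_sparse_count_matrix
  unfold build_sparse_count_matrix build_sparse_count_matrix_alt
  set L := letters.toList with hL
  set T := last_column.toList with hT
  -- the pair-state init fold of A is the pair of the two single folds
  rw [PySem.List.foldl_prod_mk
      (f := fun (d : PySem.Dict String (List Int)) (letter : Char) => d.insert letter.toString [])
      (g := fun (d : PySem.Dict String Int) (letter : Char) => d.insert letter.toString 0)]
  simp only
  -- the distinct letters, in first-occurrence order
  set M := PySem.Set.ofList L with hM
  have hndM : (M.map Char.toString).Nodup := pvMapToString_nodup (PySem.Set.nodup_ofList L)
  have hmemM : ∀ l ∈ M, l ∈ L := fun l hm => (PySem.Set.mem_ofList L l).mp hm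
  have hkA : ∀ l ∈ L,
      l.toString ∈ (L.foldl (fun (d : PySem.Dict String (List Int)) l => d.insert l.toString []) PySem.Dict.empty).keys := by
    intro l hm
    rw [pvInit_keys L (fun _ => ([] : List Int))]
    exact List.mem_map.mpr ⟨l, (PySem.Set.mem_ofList L l).mpr hm, rfl⟩
  -- the common value of both sides' row at letter l
  have hrow := fun (l : Char) =>
    (pvSamp l sparsity T 0 0).flatMap (fun c => List.replicate (L.count l) c)
  -- A's side
  rw [pvItems_of_keys_getD _ M hndM ?_ (fun l =>
        (pvSamp l sparsity T 0 0).flatMap (fun c => List.replicate (L.count l) c)) [] ?_]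
  -- B's side
  rw [pvItems_of_keys_getD _ M hndM ?_ (fun l =>
        (pvSamp l sparsity T 0 0).flatMap (fun c => List.replicate (L.count l) c)) [] ?_]
  -- B keys
  · rw [pvB_transpose_keys L _ _ hkA, pvInit_keys L (fun _ => ([] : List Int))]
  -- B values
  · intro l hl
    rw [pvB_transpose_getD L l _ _,
        pvFold_insert_getD L (fun _ => ([] : List Int)) [] l (hmemM l hl),
        pvB_loop_snaps sparsity l T 0 _ [],
        pvFold_insert_getD L (fun _ => (0 : Int)) 0 l (hmemM l hl)]
    simp
  -- A keys
  · rw [pvA_loop_keys L sparsity T 0 _ _ hkA, pvInit_keys L (fun _ => ([] : List Int))]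
  -- A values
  · intro l hl
    rw [pvA_loop_getD L sparsity l T 0 _ _,
        pvFold_insert_getD L (fun _ => ([] : List Int)) [] l (hmemM l hl),
        pvFold_insert_getD L (fun _ => (0 : Int)) 0 l (hmemM l hl)]
    simp
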